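-- pv_equiv track=rewrite | github.com/laewonJeong/algorithmPractice | LeetCode/2529-range-product-queries-of-powers/range-product-queries-of-powers.py | make_powers
-- ===== SOURCE A (Python) =====
-- def make_powers(n):
--     result = []
--     k = 0
--     while n > 0:
--         if n % 2 == 1:
--             result.append(int(pow(2, k)))
--         n //= 2
--         k += 1
--     return result
-- ===== SOURCE B (Python) =====
-- def make_powers(n):
--     if n <= 0:
--         return []
--     rest = [2 * x for x in make_powers(n // 2)]
--     return [1] + rest if n % 2 == 1 else rest
-- ===== Notes on version B (the rewrite author's own statement) =====
-- stated objective: simpler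
-- what changed: Replaced the iterative loop with its exponent counter k and explicit pow calls by a direct recursion on the halved input that doubles the recursive result, so no power is ever computed explicitly.
import Mathlib
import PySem

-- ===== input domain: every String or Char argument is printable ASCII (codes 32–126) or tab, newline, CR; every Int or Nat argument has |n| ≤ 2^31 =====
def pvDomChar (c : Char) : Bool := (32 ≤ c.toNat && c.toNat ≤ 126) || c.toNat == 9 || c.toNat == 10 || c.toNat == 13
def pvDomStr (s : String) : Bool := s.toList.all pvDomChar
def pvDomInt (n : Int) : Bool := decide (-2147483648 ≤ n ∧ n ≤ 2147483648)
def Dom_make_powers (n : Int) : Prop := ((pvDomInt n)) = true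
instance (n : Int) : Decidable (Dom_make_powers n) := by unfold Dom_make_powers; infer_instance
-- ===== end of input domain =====

-- B replaces A's loop with exponent counter and its pow calls by a recursion on n//2 that doubles
-- the recursive result (objective: simpler; same cost).

-- ===== PORT A =====
-- 'while n > 0: if n % 2 == 1: result.append(int(pow(2, k))); n //= 2; k += 1'
def make_powers_go (n : Int) (k : Nat) (result : List Int) : List Int :=
  if _h : 0 < n then
    make_powers_go (PySem.Int.floordiv n 2) (k + 1)
      (if PySem.Int.mod n 2 = 1 then result ++ [(2 : Int) ^ k] else result)
  else result
termination_by n.toNat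
decreasing_by
  rw [PySem.Int.floordiv_eq_ediv_of_pos (by omega : (0:Int) < 2)]
  omega

def make_powers (n : Int) : List Int := make_powers_go n 0 []

-- ===== PORT B =====
def make_powers_alt (n : Int) : List Int :=
  if h : n ≤ 0 then []
  else
    let rest := (make_powers_alt (PySem.Int.floordiv n 2)).map (fun x => 2 * x)
    if PySem.Int.mod n 2 = 1 then 1 :: rest else rest
termination_by n.toNat
decreasing_by
  rw [PySem.Int.floordiv_eq_ediv_of_pos (by omega : (0:Int) < 2)]
  omega

-- ===== PRECONDITION & SPEC =====
def Spec_make_powers (n : Int) (out : List Int) : Prop := out = make_powers_alt n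
instance (n : Int) (out : List Int) : Decidable (Spec_make_powers n out) := by unfold Spec_make_powers; infer_instance

-- ===== CLAIM (what is proved, stated in full; the proofs are below) =====
def Claim_equal_make_powers : Prop := ∀ (n : Int), Dom_make_powers n → Spec_make_powers n (make_powers n)

-- ===== LEMMAS AND PROOFS =====
theorem make_powers_go_eq (n : Int) (k : Nat) (acc : List Int) :
    make_powers_go n k acc = acc ++ (make_powers_alt n).map (fun x => (2 : Int) ^ k * x) := by
  by_cases h : 0 < n
  · rw [make_powers_go, make_powers_alt]
    have hle : ¬ n ≤ 0 := by omega
    simp only [dif_pos h, dif_neg hle]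
    rw [make_powers_go_eq (PySem.Int.floordiv n 2) (k + 1)]
    simp only [PySem.Int.mod_eq_emod_of_pos (by omega : (0:Int) < 2),
      PySem.Int.floordiv_eq_ediv_of_pos (by omega : (0:Int) < 2)]
    have hpow : ∀ x : Int, (2 : Int) ^ k * (2 * x) = 2 ^ (k + 1) * x := by
      intro x; ring
    by_cases hm : n % 2 = 1 <;>
      simp [hm, List.map_map] <;>
      exact fun a _ => Or.inl (by ring)
  · rw [make_powers_go, make_powers_alt]
    simp [h, (by omega : n ≤ 0)]
termination_by n.toNat
decreasing_by
  rw [PySem.Int.floordiv_eq_ediv_of_pos (by omega : (0:Int) < 2)]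
  omega

-- ===== VERDICT (by name: the statement is the Claim_ definition above) =====
theorem make_powers_spec : Claim_equal_make_powers := by
  intro n _
  unfold Spec_make_powers make_powers
  rw [make_powers_go_eq]
  simp
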